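-- pv_equiv track=rewrite | github.com/zedzijc/advent_2018 | Day_8/Advent_8b.py | get_root_value
-- ===== SOURCE A (Python) =====
-- def get_root_value(instructions, start_index=0):
--     node_value = 0
--     children = instructions[start_index]
--     meta_data_length = instructions[start_index + 1]
--     end_offset = start_index + 2
--     child_values = []
--
--     while children > 0:
--         child_results = get_root_value(instructions, end_offset)
--         child_values.append(child_results[0])
--         end_offset = child_results[1]
--         children -= 1
--
--     metadata_index = end_offset
--     metadata_end_index = end_offset + meta_data_length
--     if child_values:
--         while metadata_index < metadata_end_index:
--             metadata_value = instructions[metadata_index]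
--             if metadata_value - 1 < len(child_values):
--                 node_value += child_values[metadata_value - 1]
--             metadata_index += 1
--     else:
--         while metadata_index < metadata_end_index:
--             node_value += instructions[metadata_index]
--             metadata_index += 1
--
--     return (node_value, metadata_end_index)
-- ===== SOURCE B (Python) =====
-- def get_root_value(instructions, start_index=0):
--     # Iterative stack-based parser instead of recursion (return value identical to A's).
--     cursor = start_index
--     stack = []  # frames: [remaining_children, meta_data_length, child_values]
--     while True:
--         children = instructions[cursor]
--         meta_data_length = instructions[cursor + 1]
--         cursor += 2
--         stack.append([children, meta_data_length, []])
--         while stack[-1][0] <= 0: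
--             _, meta_len, child_values = stack.pop()
--             value = 0
--             if child_values:
--                 for k in range(cursor, cursor + meta_len):
--                     metadata_value = instructions[k]
--                     if metadata_value - 1 < len(child_values):
--                         value += child_values[metadata_value - 1]
--             else:
--                 for k in range(cursor, cursor + meta_len):
--                     value += instructions[k]
--             cursor += meta_len
--             if not stack:
--                 return (value, cursor)
--             stack[-1][2].append(value)
--             stack[-1][0] -= 1
-- ===== Notes on version B (the rewrite author's own statement) =====
-- stated objective: alternative
-- what changed: A's recursive descent is replaced by an iterative parser: a cursor plus an explicit stack of frames (remaining children, metadata length, collected child values); a node's value is computed when its frame is popped, so B uses no recursion at all.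
-- outside the precondition, e.g. on get_root_value([5, 0, 0, -2], 0): A returns (0, 2), B returns (0, 2); on get_root_value([6, -3, -1, -2], 0): A returns (0, -1), B returns (0, -1)
import Mathlib
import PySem

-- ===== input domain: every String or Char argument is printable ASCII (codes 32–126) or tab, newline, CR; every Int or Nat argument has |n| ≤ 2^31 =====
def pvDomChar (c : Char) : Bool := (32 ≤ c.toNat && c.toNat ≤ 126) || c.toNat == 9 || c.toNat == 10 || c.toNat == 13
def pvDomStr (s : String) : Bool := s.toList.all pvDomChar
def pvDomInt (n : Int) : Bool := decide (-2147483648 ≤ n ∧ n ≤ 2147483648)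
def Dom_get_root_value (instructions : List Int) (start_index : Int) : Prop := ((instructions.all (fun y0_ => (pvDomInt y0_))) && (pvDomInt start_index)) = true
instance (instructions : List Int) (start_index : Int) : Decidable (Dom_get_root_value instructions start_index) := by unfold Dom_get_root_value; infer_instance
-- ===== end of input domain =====

-- B replaces A's recursion by an iterative stack-of-frames parser with a cursor; return value identical on Pre_.

-- ===== PORT A =====
-- A's two metadata while-loops (sum child_values[t-1] when there are children, else sum raw values)
def metaValueA (ins : List Int) (cvs : List Int) (a b : Int) : Int :=
  if cvs ≠ [] then
    (PySem.List.pyRange a b 1).foldl (fun acc k =>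
      let t := PySem.List.pyGetD ins k 0
      if t - 1 < (cvs.length : Int) then acc + PySem.List.pyGetD cvs (t - 1) 0 else acc) 0
  else
    (PySem.List.pyRange a b 1).foldl (fun acc k => acc + PySem.List.pyGetD ins k 0) 0

-- fuel makes the recursion structural; ins.length + 1 is enough on Pre_ (chkNode has the same fuel discipline)
mutual
def parseA (ins : List Int) (f : Nat) (si : Int) : Int × Int :=
  match f with
  | 0 => (0, 0)
  | Nat.succ f' =>
    let children := PySem.List.pyGetD ins si 0
    let m := PySem.List.pyGetD ins (si + 1) 0
    let ce := kidsA ins f' children.toNat (si + 2)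
    (metaValueA ins ce.1 ce.2 (ce.2 + m), ce.2 + m)
def kidsA (ins : List Int) (f : Nat) (n : Nat) (eo : Int) : List Int × Int :=
  match n with
  | 0 => ([], eo)
  | Nat.succ n' =>
    match f with
    | 0 => ([], eo)
    | Nat.succ f' =>
      let r := parseA ins f' eo
      let rest := kidsA ins f' n' r.2
      (r.1 :: rest.1, rest.2)
end

def get_root_value (instructions : List Int) (start_index : Int) : Int × Int :=
  parseA instructions (2 * instructions.length + 2) start_index

-- ===== PORT B =====
-- B's two metadata for-loops (same reads as A's)
def metaValueB (ins : List Int) (cvs : List Int) (a b : Int) : Int :=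
  if cvs ≠ [] then
    (PySem.List.pyRange a b 1).foldl (fun acc k =>
      let t := PySem.List.pyGetD ins k 0
      if t - 1 < (cvs.length : Int) then acc + PySem.List.pyGetD cvs (t - 1) 0 else acc) 0
  else
    (PySem.List.pyRange a b 1).foldl (fun acc k => acc + PySem.List.pyGetD ins k 0) 0

-- stack frame: (remaining_children, meta_data_length, child_values); fuel bounds the number of nodes pushed
mutual
def runB (ins : List Int) (f : Nat) (cur : Int) (stk : List (Int × Int × List Int)) : Int × Int :=
  match f with
  | 0 => (0, 0)
  | Nat.succ f' =>
    let c := PySem.List.pyGetD ins cur 0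
    let m := PySem.List.pyGetD ins (cur + 1) 0
    settleB ins f' (cur + 2) ((c, m, ([] : List Int)) :: stk)
  termination_by (f, 0)
def settleB (ins : List Int) (f : Nat) (cur : Int) (stk : List (Int × Int × List Int)) : Int × Int :=
  match stk with
  | [] => (0, cur)
  | (rem, m, cvs) :: rest =>
    if 0 < rem then runB ins f cur ((rem, m, cvs) :: rest)
    else
      let v := metaValueB ins cvs cur (cur + m)
      match rest with
      | [] => (v, cur + m)
      | (prem, pm, pcvs) :: rrest => settleB ins f (cur + m) ((prem - 1, pm, pcvs ++ [v]) :: rrest)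
  termination_by (f, stk.length + 1)
end

def get_root_value_alt (instructions : List Int) (start_index : Int) : Int × Int :=
  runB instructions (instructions.length + 1) start_index []

-- ===== PRECONDITION & SPEC =====
-- Shape checker for Pre_: does the list encode a well-formed tree at index i (all reads inside
-- Python's index range, child-value indices t with t ≤ -children excluded)? Returns the end index
-- and the number of nodes; it computes NO node values.
mutual
def chkNode (ins : List Int) (f : Nat) (i : Int) : Option (Int × Nat) :=
  match f with
  | 0 => none
  | Nat.succ f' =>
    (PySem.List.pyGet? ins i).bind fun c =>
    (PySem.List.pyGet? ins (i + 1)).bind fun m =>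
    (chkKids ins f' c.toNat (i + 2)).bind fun p =>
    if (PySem.List.pyRange p.1 (p.1 + m) 1).all (fun k =>
          match PySem.List.pyGet? ins k with
          | some t => decide (c ≤ 0 ∨ -c ≤ t - 1)
          | none => false)
    then some (p.1 + m, p.2 + 1) else none
def chkKids (ins : List Int) (f : Nat) (n : Nat) (i : Int) : Option (Int × Nat) :=
  match n with
  | 0 => some (i, 0)
  | Nat.succ n' =>
    match f with
    | 0 => none
    | Nat.succ f' =>
      (chkNode ins f' i).bind fun p =>
      (chkKids ins f' n' p.1).bind fun q =>
      some (q.1, p.2 + q.2)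
end

def preCheck (ins : List Int) (si : Int) : Bool :=
  match chkNode ins (2 * ins.length + 2) si with
  | some (_, n) => decide (n ≤ ins.length + 1)
  | none => false

-- Pre_ = the instructions encode a well-formed day-8 tree at start_index whose node count fits the
-- fuel bound; outside it A raises (IndexError / RecursionError), except for some encodings with
-- negative metadata lengths that walk the cursor backwards, where A's termination and value are
-- accidental (A recurses forever on close variants) and which Pre_ excludes wholesale.
def Pre_get_root_value (instructions : List Int) (start_index : Int) : Prop :=
  preCheck instructions start_index = true
instance (instructions : List Int) (start_index : Int) : Decidable (Pre_get_root_value instructions start_index) := by unfold Pre_get_root_value; infer_instance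

def pvWitness_get_root_value : List Int × Int := ([2, 3, 0, 2, 10, 11, 1, 1, 0, 1, 99, 2, 1, 1, 2], 0)

def Spec_get_root_value (instructions : List Int) (start_index : Int) (out : Int × Int) : Prop := out = get_root_value_alt instructions start_index
instance (instructions : List Int) (start_index : Int) (out : Int × Int) : Decidable (Spec_get_root_value instructions start_index out) := by unfold Spec_get_root_value; infer_instance

-- ===== CLAIM (what is proved, stated in full; the proofs are below) =====
def Claim_equal_get_root_value : Prop := ∀ (instructions : List Int) (start_index : Int), Dom_get_root_value instructions start_index → Pre_get_root_value instructions start_index → Spec_get_root_value instructions start_index (get_root_value instructions start_index)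

-- ===== LEMMAS AND PROOFS =====

theorem metaValueB_eq (ins cvs : List Int) (a b : Int) :
    metaValueB ins cvs a b = metaValueA ins cvs a b := rfl

-- what the machine does right after finishing a whole subtree of value v ending at e
def afterB (ins : List Int) (v e : Int) (g : Nat) (stk : List (Int × Int × List Int)) : Int × Int :=
  match stk with
  | [] => (v, e)
  | (rem, m, cvs) :: rest => settleB ins g e ((rem - 1, m, cvs ++ [v]) :: rest)

theorem pyGetD_of_pyGet?_some {α : Type} {xs : List α} {i : Int} {v : α} (d : α)
    (h : PySem.List.pyGet? xs i = some v) : PySem.List.pyGetD xs i d = v := by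
  simp [PySem.List.pyGetD, h]

def Mstmt (ins : List Int) (f : Nat) : Prop :=
  ∀ i e n, chkNode ins f i = some (e, n) →
    (parseA ins f i).2 = e ∧
    ∀ g stk, n ≤ g →
      runB ins g i stk = afterB ins (parseA ins f i).1 e (g - n) stk

def MKstmt (ins : List Int) (f : Nat) : Prop :=
  ∀ cN i e nk, chkKids ins f cN i = some (e, nk) →
    (kidsA ins f cN i).2 = e ∧
    ∀ g (rem m : Int) cvs rest, rem.toNat = cN → nk ≤ g →
      settleB ins g i ((rem, m, cvs) :: rest)
        = afterB ins (metaValueA ins (cvs ++ (kidsA ins f cN i).1) e (e + m)) (e + m) (g - nk) rest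

theorem main_ind (ins : List Int) : ∀ f, Mstmt ins f ∧ MKstmt ins f := by
  intro f
  induction f with
  | zero =>
    constructor
    · intro i e n h; rw [chkNode] at h; exact absurd h (by simp)
    · intro cN i e nk h
      cases cN with
      | succ cN' => rw [chkKids] at h; exact absurd h (by simp)
      | zero =>
        simp only [chkKids, Option.some.injEq, Prod.mk.injEq] at h
        obtain ⟨rfl, rfl⟩ := h
        refine ⟨by simp [kidsA], ?_⟩
        intro g rem m cvs rest hrem hg
        have hrle : ¬ 0 < rem := by omega
        rw [settleB]
        simp only [if_neg hrle, metaValueB_eq]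
        have hk0 : kidsA ins 0 0 i = ([], i) := by simp [kidsA]
        cases rest with
        | nil => simp [afterB, hk0]
        | cons p rrest =>
          obtain ⟨prem, pm, pcvs⟩ := p
          simp [afterB, hk0]
  | succ f' ihf =>
    obtain ⟨ihM, ihK⟩ := ihf
    have hM : Mstmt ins (f' + 1) := by
      intro i e n h
      rw [chkNode] at h
      cases hc : PySem.List.pyGet? ins i with
      | none => rw [hc] at h; simp at h
      | some c =>
        rw [hc, Option.bind_some] at h
        cases hm : PySem.List.pyGet? ins (i + 1) with
        | none => rw [hm] at h; simp at h
        | some m =>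
          rw [hm, Option.bind_some] at h
          cases hk : chkKids ins f' c.toNat (i + 2) with
          | none => rw [hk] at h; simp at h
          | some p =>
            obtain ⟨e0, nk⟩ := p
            rw [hk, Option.bind_some] at h
            by_cases hall : ((PySem.List.pyRange e0 (e0 + m) 1).all (fun k =>
                match PySem.List.pyGet? ins k with
                | some t => decide (c ≤ 0 ∨ -c ≤ t - 1)
                | none => false)) = true
            · rw [if_pos hall, Option.some.injEq] at h
              obtain ⟨rfl, rfl⟩ : e0 + m = e ∧ nk + 1 = n := by
                exact ⟨congrArg Prod.fst h, congrArg Prod.snd h⟩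
              obtain ⟨hK2, hK⟩ := ihK c.toNat (i + 2) e0 nk hk
              have hparse : parseA ins (f' + 1) i
                  = (metaValueA ins (kidsA ins f' c.toNat (i + 2)).1 e0 (e0 + m), e0 + m) := by
                rw [parseA]
                simp only [pyGetD_of_pyGet?_some 0 hc, pyGetD_of_pyGet?_some 0 hm, hK2]
              refine ⟨by rw [hparse], ?_⟩
              intro g stk hg
              cases g with
              | zero => omega
              | succ g' =>
                rw [runB]
                simp only [pyGetD_of_pyGet?_some 0 hc, pyGetD_of_pyGet?_some 0 hm]
                rw [hK g' c m [] stk rfl (by omega)]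
                rw [hparse]
                simp only [List.nil_append]
                congr 1
                omega
            · rw [if_neg hall] at h; simp at h
    refine ⟨hM, ?_⟩
    intro cN i e nk h
    cases cN with
    | zero =>
      simp only [chkKids, Option.some.injEq, Prod.mk.injEq] at h
      obtain ⟨rfl, rfl⟩ := h
      refine ⟨by simp [kidsA], ?_⟩
      intro g rem m cvs rest hrem hg
      have hrle : ¬ 0 < rem := by omega
      rw [settleB]
      simp only [if_neg hrle, metaValueB_eq]
      have hk0 : kidsA ins (f' + 1) 0 i = ([], i) := by simp [kidsA]
      cases rest with
      | nil => simp [afterB, hk0]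
      | cons p rrest =>
        obtain ⟨prem, pm, pcvs⟩ := p
        simp [afterB, hk0]
    | succ cN' =>
      rw [chkKids] at h
      cases h1 : chkNode ins f' i with
      | none => rw [h1] at h; simp at h
      | some p1 =>
        obtain ⟨e1, k1⟩ := p1
        rw [h1, Option.bind_some] at h
        cases h2 : chkKids ins f' cN' e1 with
        | none => rw [h2] at h; simp at h
        | some p2 =>
          obtain ⟨e', k'⟩ := p2
          rw [h2, Option.bind_some, Option.some.injEq] at h
          obtain ⟨rfl, rfl⟩ : e' = e ∧ k1 + k' = nk := by
            exact ⟨congrArg Prod.fst h, congrArg Prod.snd h⟩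
          obtain ⟨hA2, hA⟩ := ihM i e1 k1 h1
          obtain ⟨hK2, hK⟩ := ihK _ _ _ _ h2
          have hkid : kidsA ins (f' + 1) (cN' + 1) i
              = ((parseA ins f' i).1 :: (kidsA ins f' cN' e1).1, (kidsA ins f' cN' e1).2) := by
            rw [kidsA]; simp only [hA2]
          refine ⟨by rw [hkid]; exact hK2, ?_⟩
          intro g rem m cvs rest hrem hg
          have hrpos : 0 < rem := by omega
          have hrem1 : (rem - 1).toNat = cN' := by omega
          rw [settleB]
          simp only [if_pos hrpos]
          rw [hA g ((rem, m, cvs) :: rest) (by omega)]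
          simp only [afterB]
          rw [hK (g - k1) (rem - 1) m (cvs ++ [(parseA ins f' i).1]) rest hrem1 (by omega)]
          rw [hkid]
          simp only [List.append_assoc, List.singleton_append]
          congr 1
          omega

-- ===== VERDICT (by name: the statement is the Claim_ definition above) =====
theorem get_root_value_spec : Claim_equal_get_root_value := by
  intro ins si _hdom hpre
  unfold Pre_get_root_value preCheck at hpre
  cases h : chkNode ins (2 * ins.length + 2) si with
  | none => rw [h] at hpre; simp at hpre
  | some p =>
    obtain ⟨e, n⟩ := p
    rw [h] at hpre
    have hn : n ≤ ins.length + 1 := by simpa using hpre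
    obtain ⟨h2, hrun⟩ := (main_ind ins (2 * ins.length + 2)).1 si e n h
    unfold Spec_get_root_value get_root_value get_root_value_alt
    rw [hrun (ins.length + 1) [] hn]
    simp only [afterB]
    rw [← h2]
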